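-- pv_equiv track=rewrite | github.com/hnjgg/SquirtlesAlgorithmStudy-Hard | 민서/풍선터트리기.py | solution
-- ===== SOURCE A (Python) =====
-- def solution(a):
--     ans = [False] * len(a)
--     mn = 1<<30
--     for i in range(len(a)):
--         if a[i] < mn:
--             ans[i] = True
--             mn = a[i]
--     mn = 1<<30
--     for i in range(len(a) - 1, -1, -1):
--         if a[i] < mn:
--             ans[i] = True
--             mn = a[i]
--     return sum(ans)
-- ===== SOURCE B (Python) =====
-- def solution(a):
--     # Inclusion-exclusion instead of marker array: count strict prefix minima
--     # plus strict suffix minima, minus 1 exactly when one balloon is counted by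
--     # both passes -- which happens iff the smallest value (below the 1 << 30
--     # sentinel that A also uses) occurs exactly once.
--     INF = 1 << 30
--
--     def scan(xs):
--         c, m = 0, INF
--         for x in xs:
--             if x < m:
--                 c += 1
--                 m = x
--         return c, m
--
--     left, m = scan(a)
--     right, _ = scan(reversed(a))
--     dup = 1 if m < INF and a.count(m) == 1 else 0
--     return left + right - dup
-- ===== Notes on version B (the rewrite author's own statement) =====
-- stated objective: alternative
-- what changed: Replaces A's boolean marker array with two OR-marking passes plus a sum by inclusion-exclusion: count strict prefix minima plus strict suffix minima, then subtract 1 exactly when the minimum (below the 1<<30 sentinel) is unique, since that unique global minimum is the only balloon both passes count.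
import Mathlib
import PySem

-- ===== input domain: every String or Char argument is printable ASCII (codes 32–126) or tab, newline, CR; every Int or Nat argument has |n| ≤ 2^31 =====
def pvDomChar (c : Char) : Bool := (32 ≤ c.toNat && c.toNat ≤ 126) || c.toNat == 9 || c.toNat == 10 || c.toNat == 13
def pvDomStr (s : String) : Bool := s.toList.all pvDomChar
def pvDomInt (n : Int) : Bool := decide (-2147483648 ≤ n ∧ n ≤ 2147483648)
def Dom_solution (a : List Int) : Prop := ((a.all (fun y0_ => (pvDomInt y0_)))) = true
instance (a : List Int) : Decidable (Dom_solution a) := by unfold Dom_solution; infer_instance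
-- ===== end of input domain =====

-- B replaces A's boolean marker array (two OR-marking passes + sum) by
-- inclusion-exclusion: (# strict prefix minima) + (# strict suffix minima)
-- minus 1 when the minimum below the 1<<30 sentinel is unique (alternative
-- decomposition, same O(n) cost).

-- ===== PORT A =====
-- one loop body, shared by both of A's passes (same code in the Python)
-- pyGetD with default 0 is exact here: every i comes from range(len(a)).
def stepA (a : List Int) (st : List Bool × Int) (i : Int) : List Bool × Int :=
  if PySem.List.pyGetD a i 0 < st.2 then
    (PySem.List.pySetD st.1 i true, PySem.List.pyGetD a i 0)
  else st

def solution (a : List Int) : Int :=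
  let n : Int := (a.length : Int)
  let st1 := (PySem.List.pyRange 0 n 1).foldl (stepA a)
      (List.replicate a.length false, 1073741824)
  let st2 := (PySem.List.pyRange (n - 1) (-1) (-1)).foldl (stepA a)
      (st1.1, 1073741824)
  (st2.1.map (fun b => if b then (1 : Int) else 0)).sum

-- ===== PORT B =====
-- the shared scan: c, m = 0, INF; for x: if x < m: c += 1; m = x
def scanB (st : Int × Int) (x : Int) : Int × Int :=
  if x < st.2 then (st.1 + 1, x) else st

def solution_alt (a : List Int) : Int :=
  let p := a.foldl scanB (0, 1073741824)
  let q := a.reverse.foldl scanB (0, 1073741824)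
  let dup : Int := if p.2 < 1073741824 ∧ PySem.List.count a p.2 = 1 then 1 else 0
  p.1 + q.1 - dup

-- ===== PRECONDITION & SPEC =====
def Spec_solution (a : List Int) (out : Int) : Prop := out = solution_alt a
instance (a : List Int) (out : Int) : Decidable (Spec_solution a out) := by unfold Spec_solution; infer_instance

-- ===== CLAIM (what is proved, stated in full; the proofs are below) =====
def Claim_equal_solution : Prop := ∀ (a : List Int), Dom_solution a → Spec_solution a (solution a)

-- ===== LEMMAS AND PROOFS =====

-- min of a list with the 1<<30 sentinel as base
def pvPm (l : List Int) : Int := l.foldl min 1073741824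

-- marks of A's forward pass (r = running prefix min)
def pvMarks1 : Int → List Int → List Bool
  | _, [] => []
  | r, x :: t => decide (x < r) :: pvMarks1 (min r x) t

-- marks of A's backward pass, for a prefix of the array with base value r
def pvMk : List Int → Int → List Bool
  | [], _ => []
  | x :: p, r => decide (x < p.foldl min r) :: pvMk p r

-- the common specification both programs compute
def pvSpecCount : Int → List Int → Int
  | _, [] => 0
  | r, x :: t => (if x < r ∨ x < pvPm t then 1 else 0) + pvSpecCount (min r x) t

-- B-side counters
def pvLeft : Int → List Int → Int
  | _, [] => 0
  | r, x :: t => (if x < r then 1 else 0) + pvLeft (min r x) t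

def pvRightC : List Int → Int
  | [] => 0
  | x :: t => (if x < pvPm t then 1 else 0) + pvRightC t

def pvBoth : Int → List Int → Int
  | _, [] => 0
  | r, x :: t => (if x < r ∧ x < pvPm t then 1 else 0) + pvBoth (min r x) t

theorem pv_foldl_min_snoc (t : List Int) : ∀ (s x : Int),
    t.foldl min (min s x) = min (t.foldl min s) x := by
  induction t with
  | nil => intro s x; simp
  | cons y t ih =>
    intro s x
    have : min (min s x) y = min (min s y) x := by
      simp [min_assoc, min_comm x y]
    simp only [List.foldl_cons, this, ih]

theorem pv_foldl_min_comm (t : List Int) (a b : Int) :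
    t.foldl min (min a b) = min a (t.foldl min b) := by
  rw [min_comm a b, pv_foldl_min_snoc, min_comm]

theorem pv_foldl_min_le (t : List Int) : ∀ (s : Int), t.foldl min s ≤ s := by
  induction t with
  | nil => intro s; simp
  | cons x t ih =>
    intro s
    calc (x :: t).foldl min s = t.foldl min (min s x) := rfl
    _ ≤ min s x := ih _
    _ ≤ s := min_le_left _ _

theorem pv_foldl_min_le_mem (t : List Int) : ∀ (s v : Int), v ∈ t → t.foldl min s ≤ v := by
  induction t with
  | nil => intro s v h; cases h
  | cons x t ih =>
    intro s v h
    rcases List.mem_cons.1 h with rfl | hv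
    · calc (v :: t).foldl min s = t.foldl min (min s v) := rfl
      _ ≤ min s v := pv_foldl_min_le _ _
      _ ≤ v := min_le_right _ _
    · exact ih (min s x) v hv

theorem pv_foldl_min_mem (t : List Int) : ∀ (s : Int), t.foldl min s < s → t.foldl min s ∈ t := by
  induction t with
  | nil => intro s h; simp at h
  | cons x t ih =>
    intro s h
    have hform : (x :: t).foldl min s = t.foldl min (min s x) := rfl
    by_cases hlt : t.foldl min (min s x) < min s x
    · exact List.mem_cons_of_mem _ (ih _ hlt)
    · have hle := pv_foldl_min_le t (min s x)
      have heq : t.foldl min (min s x) = min s x := le_antisymm hle (not_lt.1 hlt)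
      rw [hform, heq] at h ⊢
      have : min s x = x := by omega
      rw [this]
      exact List.mem_cons_self
  
theorem pv_foldl_min_rev (t : List Int) : ∀ (s : Int),
    t.reverse.foldl min s = t.foldl min s := by
  induction t with
  | nil => intro s; rfl
  | cons x t ih =>
    intro s
    simp only [List.reverse_cons, List.foldl_append, List.foldl_cons, List.foldl_nil, ih,
      ← pv_foldl_min_snoc]

theorem pv_length_marks1 : ∀ (r : Int) (t : List Int), (pvMarks1 r t).length = t.length := by
  intro r t
  induction t generalizing r with
  | nil => rfl
  | cons x t ih => simp [pvMarks1, ih]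

theorem pv_length_Mk : ∀ (p : List Int) (r : Int), (pvMk p r).length = p.length := by
  intro p r
  induction p generalizing r with
  | nil => rfl
  | cons x p ih => simp [pvMk, ih]

theorem pv_set_append_mid (d : List Bool) (y v : Bool) (r : List Bool) :
    (d ++ y :: r).set d.length v = d ++ v :: r := by
  induction d with
  | nil => rfl
  | cons z d ih => simp [ih]

theorem pv_Mk_snoc : ∀ (p : List Int) (y : Int) (r : Int),
    pvMk (p ++ [y]) r = pvMk p (min r y) ++ [decide (y < r)] := by
  intro p
  induction p with
  | nil => intro y r; simp [pvMk]
  | cons x p ih =>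
    intro y r
    simp only [List.cons_append, pvMk, ih, List.foldl_append, List.foldl_cons, List.foldl_nil,
      ← pv_foldl_min_snoc]

theorem pv_loop1 : ∀ (t pref : List Int) (done : List Bool) (mn : Int),
    done.length = pref.length →
    (PySem.List.pyRange (pref.length : Int) ((pref.length : Int) + t.length) 1).foldl
        (stepA (pref ++ t)) (done ++ List.replicate t.length false, mn)
      = (done ++ pvMarks1 mn t, t.foldl min mn) := by
  intro t
  induction t with
  | nil =>
    intro pref done mn h
    rw [PySem.List.pyRange_one_eq_nil (by simp)]
    simp [pvMarks1]
  | cons x t ih =>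
    intro pref done mn h
    have hlt : (pref.length : Int) < (pref.length : Int) + ((x :: t).length : Int) := by
      simp
    rw [PySem.List.pyRange_one_cons hlt]
    simp only [List.foldl_cons]
    have hget : PySem.List.pyGetD (pref ++ x :: t) ((pref.length : Int)) 0 = x := by
      simp [PySem.List.pyGetD_natCast, List.getD]
    have hset : ∀ b : Bool,
        PySem.List.pySetD (done ++ b :: List.replicate t.length false) ((pref.length : Int)) true
          = done ++ true :: List.replicate t.length false := by
      intro b
      rw [PySem.List.pySetD_natCast, ← h, pv_set_append_mid]
    have harr : pref ++ x :: t = (pref ++ [x]) ++ t := by simp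
    have hlen2 : (done ++ [true]).length = (pref ++ [x]).length := by simp [h]
    have hlen3 : (done ++ [false]).length = (pref ++ [x]).length := by simp [h]
    have hrange : PySem.List.pyRange ((pref.length : Int) + 1)
        ((pref.length : Int) + (((t.length + 1 : Nat)) : Int)) 1
        = PySem.List.pyRange (((pref ++ [x]).length : Int))
            (((pref ++ [x]).length : Int) + (t.length : Int)) 1 := by
      have e1 : (((pref ++ [x]).length : Int)) = (pref.length : Int) + 1 := by simp
      have e2 : (pref.length : Int) + (((t.length + 1 : Nat)) : Int)
          = (pref.length : Int) + 1 + (t.length : Int) := by push_cast; ring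
      rw [e1, e2]
    simp only [List.length_cons, List.replicate_succ]
    by_cases hx : x < mn
    · have hstep : stepA (pref ++ x :: t)
          (done ++ false :: List.replicate t.length false, mn) ((pref.length : Int))
          = ((done ++ [true]) ++ List.replicate t.length false, x) := by
        simp only [stepA, hget, if_pos hx, hset, List.append_assoc, List.singleton_append]
      rw [hstep, hrange, harr, ih (pref ++ [x]) (done ++ [true]) x hlen2]
      have hmin : min mn x = x := min_eq_right (le_of_lt hx)
      simp [pvMarks1, hx, hmin]
    · have hstep : stepA (pref ++ x :: t)
          (done ++ false :: List.replicate t.length false, mn) ((pref.length : Int))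
          = ((done ++ [false]) ++ List.replicate t.length false, mn) := by
        simp only [stepA, hget, if_neg hx, List.append_assoc, List.singleton_append]
      rw [hstep, hrange, harr, ih (pref ++ [x]) (done ++ [false]) mn hlen3]
      have hmin : min mn x = mn := min_eq_left (not_lt.1 hx)
      simp [pvMarks1, hx, hmin]

theorem pv_loop2 : ∀ (pref rest : List Int) (ansP ansT : List Bool) (mn : Int),
    ansP.length = pref.length →
    (PySem.List.pyRange ((pref.length : Int) - 1) (-1) (-1)).foldl
        (stepA (pref ++ rest)) (ansP ++ ansT, mn)
      = (List.zipWith or ansP (pvMk pref mn) ++ ansT, pref.foldl min mn) := by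
  intro pref
  induction pref using List.reverseRecOn with
  | nil =>
    intro rest ansP ansT mn h
    obtain rfl : ansP = [] := List.eq_nil_of_length_eq_zero h
    rw [show ((List.length ([] : List Int) : Int) - 1) = (-1 : Int) by simp,
      PySem.List.pyRange_neg_one_eq_nil (by norm_num)]
    simp [pvMk]
  | append_singleton p y ih =>
    intro rest ansP ansT mn h
    have hne : ansP ≠ [] := by
      intro e
      rw [e] at h
      simp at h
    obtain ⟨q, b, rfl⟩ : ∃ q b, ansP = q ++ [b] :=
      ⟨ansP.dropLast, ansP.getLast hne, (List.dropLast_append_getLast hne).symm⟩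
    have hq : q.length = p.length := by
      simp at h
      omega
    have hstart : (((p ++ [y]).length : Int)) - 1 = (p.length : Int) := by simp
    rw [hstart, PySem.List.pyRange_neg_one_cons (by omega)]
    simp only [List.foldl_cons]
    have harr : (p ++ [y]) ++ rest = p ++ (y :: rest) := by simp
    have hget : PySem.List.pyGetD ((p ++ [y]) ++ rest) ((p.length : Int)) 0 = y := by
      rw [harr]
      simp [PySem.List.pyGetD_natCast, List.getD]
    have hlist : (q ++ [b]) ++ ansT = q ++ (b :: ansT) := by simp
    have hset : PySem.List.pySetD (q ++ b :: ansT) ((p.length : Int)) true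
        = q ++ true :: ansT := by
      rw [PySem.List.pySetD_natCast, ← hq, pv_set_append_mid]
    have hlenMk : q.length = (pvMk p (min mn y)).length := by rw [pv_length_Mk, hq]
    have hzip : ∀ c : Bool, List.zipWith or (q ++ [b]) (pvMk p (min mn y) ++ [c])
        = List.zipWith or q (pvMk p (min mn y)) ++ [b || c] := by
      intro c
      rw [List.zipWith_append hlenMk]
      rfl
    have hfold : (p ++ [y]).foldl min mn = p.foldl min (min mn y) := by
      rw [List.foldl_append, pv_foldl_min_snoc]
      rfl
    by_cases hy : y < mn
    · have hstep : stepA ((p ++ [y]) ++ rest) ((q ++ [b]) ++ ansT, mn) ((p.length : Int))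
          = (q ++ true :: ansT, y) := by
        simp only [stepA, hget, if_pos hy, hlist, hset]
      rw [hstep, harr, ih (y :: rest) q (true :: ansT) y hq]
      have hmin : min mn y = y := min_eq_right (le_of_lt hy)
      rw [hmin] at hzip
      rw [pv_Mk_snoc, hfold, hmin]
      simp [hzip true, hy]
    · have hstep : stepA ((p ++ [y]) ++ rest) ((q ++ [b]) ++ ansT, mn) ((p.length : Int))
          = (q ++ b :: ansT, mn) := by
        simp only [stepA, hget, if_neg hy, hlist]
      rw [hstep, harr, ih (y :: rest) q (b :: ansT) mn hq]
      have hmin : min mn y = mn := min_eq_left (not_lt.1 hy)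
      rw [hmin] at hzip
      rw [pv_Mk_snoc, hfold, hmin]
      simp [hzip false, hy]

theorem pv_count_or (a : List Int) : ∀ (r : Int),
    ((List.zipWith or (pvMarks1 r a) (pvMk a 1073741824)).map
        (fun b => if b then (1 : Int) else 0)).sum = pvSpecCount r a := by
  induction a with
  | nil => intro r; simp [pvMarks1, pvMk, pvSpecCount]
  | cons x t ih =>
    intro r
    simp only [pvMarks1, pvMk, List.zipWith_cons_cons, List.map_cons, List.sum_cons, ih,
      pvSpecCount, pvPm, Bool.or_eq_true, decide_eq_true_eq]
    split_ifs <;> simp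

theorem pv_solutionA_eq (a : List Int) : solution a = pvSpecCount 1073741824 a := by
  have h1 := pv_loop1 a [] [] 1073741824 rfl
  simp only [List.nil_append, List.length_nil, Nat.cast_zero, zero_add] at h1
  have h2 := pv_loop2 a [] (pvMarks1 1073741824 a) [] 1073741824 (pv_length_marks1 _ _)
  simp only [List.append_nil] at h2
  show ((((PySem.List.pyRange ((a.length : Int) - 1) (-1) (-1)).foldl (stepA a)
      (((PySem.List.pyRange 0 (a.length : Int) 1).foldl (stepA a)
        (List.replicate a.length false, 1073741824)).1, 1073741824)).1).map
      (fun b => if b then (1 : Int) else 0)).sum = pvSpecCount 1073741824 a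
  rw [h1]
  simp only
  rw [h2]
  simp only
  exact pv_count_or a 1073741824

-- B-side lemmas

theorem pv_scan_fold : ∀ (l : List Int) (c r : Int),
    l.foldl scanB (c, r) = (c + pvLeft r l, l.foldl min r) := by
  intro l
  induction l with
  | nil => intro c r; simp [pvLeft]
  | cons x t ih =>
    intro c r
    by_cases hx : x < r
    · have hmin : min r x = x := min_eq_right (le_of_lt hx)
      simp [scanB, hx, ih, pvLeft, hmin]
      ring
    · have hmin : min r x = r := min_eq_left (not_lt.1 hx)
      simp [scanB, hx, ih, pvLeft, hmin]

theorem pv_left_snoc : ∀ (l : List Int) (r x : Int),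
    pvLeft r (l ++ [x]) = pvLeft r l + (if x < l.foldl min r then 1 else 0) := by
  intro l
  induction l with
  | nil => intro r x; simp [pvLeft]
  | cons y l ih =>
    intro r x
    simp only [List.cons_append, pvLeft, ih, List.foldl_cons]
    omega

theorem pv_left_rev : ∀ (l : List Int), pvLeft 1073741824 l.reverse = pvRightC l := by
  intro l
  induction l with
  | nil => rfl
  | cons x t ih =>
    simp only [List.reverse_cons, pv_left_snoc, ih, pv_foldl_min_rev, pvRightC, pvPm]
    omega

theorem pv_IE : ∀ (l : List Int) (r : Int),
    pvSpecCount r l + pvBoth r l = pvLeft r l + pvRightC l := by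
  intro l
  induction l with
  | nil => intro r; simp [pvSpecCount, pvBoth, pvLeft, pvRightC]
  | cons x t ih =>
    intro r
    simp only [pvSpecCount, pvBoth, pvLeft, pvRightC]
    have := ih (min r x)
    by_cases h1 : x < r <;> by_cases h2 : x < pvPm t <;>
      simp [h1, h2] <;> omega

theorem pv_both_eq : ∀ (l : List Int) (r : Int), r ≤ 1073741824 →
    pvBoth r l
      = if l.foldl min r < r ∧ PySem.List.count l (l.foldl min r) = 1 then 1 else 0 := by
  intro l
  induction l with
  | nil =>
    intro r _
    simp [pvBoth]
  | cons x t ih =>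
    intro r hr
    have hP : pvPm t = t.foldl min 1073741824 := rfl
    have hrx : min r x ≤ 1073741824 := le_trans (min_le_left _ _) hr
    have hM : t.foldl min (min r x) = min (min r x) (pvPm t) := by
      calc t.foldl min (min r x) = t.foldl min (min (min r x) 1073741824) := by
            rw [min_eq_left hrx]
        _ = min (min r x) (t.foldl min 1073741824) := pv_foldl_min_comm t _ _
        _ = min (min r x) (pvPm t) := by rw [← hP]
    have hwhole : (x :: t).foldl min r = t.foldl min (min r x) := rfl
    have hcc : ∀ v : Int, v ≠ x → PySem.List.count (x :: t) v = PySem.List.count t v := by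
      intro v hv
      simp [PySem.List.count_eq, List.count_cons]
      omega
    have hcx : PySem.List.count (x :: t) x = PySem.List.count t x + 1 := by
      simp [PySem.List.count_eq]
    have hstep : pvBoth r (x :: t)
        = (if x < r ∧ x < pvPm t then 1 else 0) + pvBoth (min r x) t := rfl
    rw [hstep, ih (min r x) hrx, hwhole, hM]
    by_cases hxr : x < r
    · have hminrx : min r x = x := min_eq_right (le_of_lt hxr)
      by_cases hxP : x < pvPm t
      · -- head qualifies; it is the unique strict minimum
        have hm : min (min r x) (pvPm t) = x := by rw [hminrx, min_eq_left (le_of_lt hxP)]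
        rw [hm, hminrx]
        have hnot : x ∉ t := fun hmem =>
          absurd (by rw [hP]; exact pv_foldl_min_le_mem t 1073741824 x hmem) (not_le.2 hxP)
        have hc0 : PySem.List.count t x = 0 := by
          rw [PySem.List.count_eq]
          exact List.count_eq_zero.2 hnot
        rw [hcx]
        split_ifs <;> omega
      · have hPx : pvPm t ≤ x := not_lt.1 hxP
        have hm : min (min r x) (pvPm t) = pvPm t := by rw [hminrx, min_eq_right hPx]
        rw [hm, hminrx]
        by_cases hPltx : pvPm t < x
        · rw [hcc _ (ne_of_lt hPltx)]
          split_ifs <;> omega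
        · have hPeqx : pvPm t = x := le_antisymm hPx (not_lt.1 hPltx)
          have hmemP : pvPm t ∈ t := by
            rw [hP]
            exact pv_foldl_min_mem t 1073741824 (by rw [← hP]; omega)
          have hc1 : 1 ≤ PySem.List.count t (pvPm t) := by
            rw [PySem.List.count_eq]
            exact List.count_pos_iff.2 hmemP
          rw [hPeqx] at hc1 ⊢
          rw [hcx]
          split_ifs <;> omega
    · have hminrx : min r x = r := min_eq_left (not_lt.1 hxr)
      rw [hminrx]
      by_cases hmr : min r (pvPm t) < r
      · have hne : min r (pvPm t) ≠ x := by
          have : r ≤ x := not_lt.1 hxr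
          omega
        rw [hcc _ hne]
        split_ifs <;> omega
      · split_ifs <;> omega

theorem pv_solutionB_eq (a : List Int) : solution_alt a = pvSpecCount 1073741824 a := by
  show (a.foldl scanB (0, 1073741824)).1 + (a.reverse.foldl scanB (0, 1073741824)).1 -
      (if (a.foldl scanB (0, 1073741824)).2 < 1073741824 ∧
          PySem.List.count a (a.foldl scanB (0, 1073741824)).2 = 1 then (1:Int) else 0)
      = pvSpecCount 1073741824 a
  rw [pv_scan_fold, pv_scan_fold]
  simp only [zero_add]
  rw [pv_left_rev, ← pv_both_eq a 1073741824 (le_refl _)]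
  have := pv_IE a 1073741824
  omega

-- ===== VERDICT (by name: the statement is the Claim_ definition above) =====
theorem solution_spec : Claim_equal_solution := by
  intro a _
  unfold Spec_solution
  rw [pv_solutionA_eq, pv_solutionB_eq]
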